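-- pv_equiv track=rewrite | github.com/fernandacodes/UFAM_atividades | 1_periodo/atvDominoPart1_bloco4.py | lista_de_jogadas
-- ===== SOURCE A (Python) =====
-- def lista_de_jogadas(pedras):
--     indice = []
--     pedra_anterior = 0
--     cont = 0
--     contb = 0
--     dontb = 0
--     dont = 0
--     for i in range(len(pedras)):
--         if(len(pedras[i])>1):
--             indice.append(i)
--     if(len(indice)==2):
--         a,b = indice
--     else:
--         b = 0
--         a = indice[0]
--     pedraa = pedras[a]
--     pedrab = pedras[b]
--     for i in range(len(pedraa)):
--         a,b = pedraa[i]
--         if(a==pedra_anterior):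
--             cont+=1
--         else:
--             dont+=1
--         if(pedra_anterior!=7):
--             pedra_anterior = b
--     for i in range(len(pedrab)):
--         a,b  = pedrab[i]
--         if(a==pedra_anterior):
--             contb+=1
--         else:
--             dontb+=1
--         if(pedra_anterior!=7):
--             pedra_anterior = b
--     if(dont > 1 or dontb >1):
--         return False
--     else:
--         return True
-- ===== SOURCE B (Python) =====
-- def lista_de_jogadas(pedras):
--     idx = [i for i, p in enumerate(pedras) if len(p) > 1]
--     a, b = idx if len(idx) == 2 else (idx[0], 0)
--     seq = pedras[a] + pedras[b]
--     # closed-form anterior: the anterior freezes at 7 forever, so the value each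
--     # stone is compared against is just the previous stone's second half -- except
--     # after the first 7 among those halves, where it is 7 from then on.
--     ys = [y for _, y in seq]
--     k = ys.index(7) if 7 in ys else len(ys)
--     expected = ([0] + ys)[:k + 1] + [7] * (len(seq) - k - 1)
--     bad = [x != e for (x, _), e in zip(seq, expected)]
--     n = len(pedras[a])
--     return sum(bad[:n]) <= 1 and sum(bad[n:]) <= 1
-- ===== Notes on version B (the rewrite author's own statement) =====
-- stated objective: alternative
-- what changed: Replaces A's loop-carried pedra_anterior state with a closed form: since the anterior freezes at 7 forever, the value each stone is compared against is simply the previous stone's second half up to the first 7 among those halves and 7 afterwards; B builds that expected list positionally (shift + first-index-of-7 + replicate) with no sequential state and judges each selected sequence by summing a slice of the mismatch list.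
import Mathlib
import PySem

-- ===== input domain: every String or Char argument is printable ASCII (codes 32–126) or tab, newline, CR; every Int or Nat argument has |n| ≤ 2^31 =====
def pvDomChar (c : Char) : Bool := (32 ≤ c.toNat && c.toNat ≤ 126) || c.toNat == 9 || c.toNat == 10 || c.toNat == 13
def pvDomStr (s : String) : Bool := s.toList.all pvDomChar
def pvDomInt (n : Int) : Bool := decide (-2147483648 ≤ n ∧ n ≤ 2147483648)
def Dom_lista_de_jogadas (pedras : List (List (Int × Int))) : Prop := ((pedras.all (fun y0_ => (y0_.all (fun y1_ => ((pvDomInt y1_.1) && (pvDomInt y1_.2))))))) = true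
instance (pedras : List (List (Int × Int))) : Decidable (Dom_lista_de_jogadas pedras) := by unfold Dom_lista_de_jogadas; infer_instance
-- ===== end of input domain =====

-- B drops A's loop-carried pedra_anterior: it builds the expected-value list in closed form
-- (previous second halves, frozen to 7 after the first 7 among them) and compares positionally.

-- ===== PORT A =====
-- A's loop over range(len(pedraa)) reading pedraa[i] is ported as a foldl over the list itself
-- (the indices visit exactly the elements in order); state = (pedra_anterior, cont, dont).
def pvStepA (st : Int × Nat × Nat) (p : Int × Int) : Int × Nat × Nat :=
  let st' : Int × Nat × Nat :=
    if p.1 == st.1 then (st.1, st.2.1 + 1, st.2.2) else (st.1, st.2.1, st.2.2 + 1)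
  if st'.1 != 7 then (p.2, st'.2.1, st'.2.2) else st'

def lista_de_jogadas (pedras : List (List (Int × Int))) : Bool :=
  let indice : List Nat := (List.range pedras.length).foldl
    (fun acc i => if (pedras.getD i []).length > 1 then acc ++ [i] else acc) []
  let ab : Nat × Nat :=
    if indice.length == 2 then (indice.headD 0, indice.getD 1 0)   -- a,b = indice
    else (indice.headD 0, 0)   -- indice[0]; Pre_ guarantees indice ≠ []
  let pedraa := pedras.getD ab.1 []
  let pedrab := pedras.getD ab.2 []
  let s1 := pedraa.foldl pvStepA (0, 0, 0)
  let s2 := pedrab.foldl pvStepA (s1.1, 0, 0)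
  if s1.2.2 > 1 || s2.2.2 > 1 then false else true

-- ===== PORT B =====
def lista_de_jogadas_alt (pedras : List (List (Int × Int))) : Bool :=
  let idx : List Nat := (List.range pedras.length).filter
    (fun i => (pedras.getD i []).length > 1)
  let ab : Nat × Nat :=
    if idx.length == 2 then (idx.headD 0, idx.getD 1 0)
    else (idx.headD 0, 0)
  let pa := pedras.getD ab.1 []
  let seq := pa ++ pedras.getD ab.2 []
  let ys := seq.map Prod.snd
  let k := (PySem.List.index? ys 7).getD ys.length   -- ys.index(7) if 7 in ys else len(ys)
  let expected := ((0 :: ys).take (k + 1)) ++ List.replicate (seq.length - (k + 1)) 7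
  let bad := (seq.zip expected).map (fun pe => pe.1.1 != pe.2)
  let n := pa.length
  decide ((bad.take n).countP id ≤ 1) && decide ((bad.drop n).countP id ≤ 1)

-- ===== PRECONDITION & SPEC =====
-- Pre_ excludes exactly the inputs (no sublist of length > 1) on which A raises IndexError at indice[0].
def Pre_lista_de_jogadas (pedras : List (List (Int × Int))) : Prop :=
  ∃ p ∈ pedras, 1 < p.length
instance (pedras : List (List (Int × Int))) : Decidable (Pre_lista_de_jogadas pedras) := by
  unfold Pre_lista_de_jogadas; infer_instance

def pvWitness_lista_de_jogadas : (List (List (Int × Int))) := [[(0, 3), (3, 5)]]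

def Spec_lista_de_jogadas (pedras : List (List (Int × Int))) (out : Bool) : Prop :=
  out = lista_de_jogadas_alt pedras
instance (pedras : List (List (Int × Int))) (out : Bool) : Decidable (Spec_lista_de_jogadas pedras out) := by
  unfold Spec_lista_de_jogadas; infer_instance

-- ===== CLAIM =====
def Claim_equal_lista_de_jogadas : Prop := ∀ (pedras : List (List (Int × Int))), Dom_lista_de_jogadas pedras → Pre_lista_de_jogadas pedras → Spec_lista_de_jogadas pedras (lista_de_jogadas pedras)

-- ===== LEMMAS AND PROOFS =====

-- trace of the anterior value seen by each stone (A's carried state), proof-only helper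
def pvAnts : List (Int × Int) → Int → List Int
  | [], _ => []
  | p :: r, ant => ant :: pvAnts r (if ant != 7 then p.2 else ant)

theorem pvAnts_length (l : List (Int × Int)) (ant : Int) :
    (pvAnts l ant).length = l.length := by
  induction l generalizing ant with
  | nil => rfl
  | cons p r ih => simp [pvAnts, ih]

-- A's fold invariant: final anterior, cont = matches, dont = mismatches against the trace
theorem pvStepA_eq (ant : Int) (c d : Nat) (x y : Int) :
    pvStepA (ant, c, d) (x, y) =
      ((if ant != 7 then y else ant),
       (if x == ant then c + 1 else c),
       (if x == ant then d else d + 1)) := by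
  simp only [pvStepA]
  by_cases hx : (x == ant) = true <;> by_cases h7 : (ant != 7) = true <;>
    simp [hx, h7]

def pvLastAnt : List (Int × Int) → Int → Int
  | [], ant => ant
  | p :: r, ant => pvLastAnt r (if ant != 7 then p.2 else ant)

theorem pvFoldA (l : List (Int × Int)) (ant : Int) (c d : Nat) :
    l.foldl pvStepA (ant, c, d) =
      (pvLastAnt l ant,
       c + ((l.zip (pvAnts l ant)).map (fun pe => pe.1.1 != pe.2)).countP (fun b => !b),
       d + ((l.zip (pvAnts l ant)).map (fun pe => pe.1.1 != pe.2)).countP id) := by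
  induction l generalizing ant c d with
  | nil => simp [pvLastAnt, pvAnts]
  | cons p rest ih =>
    obtain ⟨x, y⟩ := p
    rw [List.foldl_cons, pvStepA_eq]
    by_cases hx : (x == ant) = true <;> by_cases h7 : (ant != 7) = true <;>
      simp [hx, ih, pvAnts, pvLastAnt, bne] <;> omega

-- once frozen at 7, the trace is all 7s
theorem pvAnts_frozen (l : List (Int × Int)) : pvAnts l 7 = List.replicate l.length 7 := by
  induction l with
  | nil => rfl
  | cons p r ih => simp [pvAnts, ih, List.replicate_succ]

-- the closed form B uses: trace = previous second halves, 7 after the first 7 among them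
theorem pvAnts_closed (l : List (Int × Int)) (ant : Int) (h : ant ≠ 7) :
    pvAnts l ant =
      (((ant :: l.map Prod.snd).take
          (((PySem.List.index? (l.map Prod.snd) 7).getD (l.map Prod.snd).length) + 1)) ++
        List.replicate
          (l.length - (((PySem.List.index? (l.map Prod.snd) 7).getD (l.map Prod.snd).length) + 1)) 7).take
        l.length := by
  induction l generalizing ant with
  | nil => rfl
  | cons p r ih =>
    obtain ⟨x, y⟩ := p
    by_cases hy : y = 7
    · subst hy
      have hk : PySem.List.index? (((x, (7:Int)) :: r).map Prod.snd) 7 = some 0 := by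
        simp [PySem.List.index?_eq_idxOf?, List.idxOf?_cons]
      simp only [hk, Option.getD_some]
      simp [pvAnts, h, pvAnts_frozen, List.take_succ_cons]
    · have hk : PySem.List.index? (((x, y) :: r).map Prod.snd) 7
          = (PySem.List.index? (r.map Prod.snd) 7).map (· + 1) := by
        have := PySem.List.index?_cons_of_ne (xs := r.map Prod.snd) (x := y) (v := 7) hy
        simpa using this
      have hrec := ih y hy
      rw [hk]
      cases hidx : PySem.List.index? (r.map Prod.snd) 7 with
      | none =>
        rw [hidx] at hrec
        simp only [Option.getD_none, Option.map_none] at hrec ⊢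
        simp only [List.length_map, List.length_cons] at hrec ⊢
        have : (r.map Prod.snd).take r.length = r.map Prod.snd := by simp
        simp [pvAnts, h, hrec, List.take_succ_cons]
      | some k =>
        rw [hidx] at hrec
        simp only [Option.getD_some, Option.map_some] at hrec ⊢
        simp only [pvAnts, h, bne_iff_ne, ne_eq, not_false_iff, if_true, hrec]
        simp [List.take_succ_cons, Nat.succ_sub_succ]

-- zipping ignores the tail of the longer second list
theorem pvZip_take {α β : Type} (l : List α) (l' : List β) :
    l.zip (l'.take l.length) = l.zip l' := by
  induction l generalizing l' with
  | nil => simp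
  | cons x r ih =>
    cases l' with
    | nil => simp
    | cons y r' => simp [List.take_succ_cons, ih]

theorem pvIndice_eq (pedras : List (List (Int × Int))) :
    (List.range pedras.length).foldl
      (fun acc i => if (pedras.getD i []).length > 1 then acc ++ [i] else acc) [] =
    (List.range pedras.length).filter (fun i => (pedras.getD i []).length > 1) := by
  rw [PySem.List.foldl_append_ite_eq_filter]
  simp

theorem pvVerdict_eq (d1 d2 : Nat) :
    (if d1 > 1 || d2 > 1 then false else true) =
      (decide (d1 ≤ 1) && decide (d2 ≤ 1)) := by
  by_cases h1 : 1 < d1 <;> by_cases h2 : 1 < d2 <;> simp [h1, h2] ; omega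

-- the shared core once both ports have selected the same pedraa/pedrab
theorem pvCore (pa pb : List (Int × Int)) :
    (if (pa.foldl pvStepA ((0 : Int), (0 : Nat), (0 : Nat))).2.2 > 1 ||
        (pb.foldl pvStepA ((pa.foldl pvStepA ((0 : Int), (0 : Nat), (0 : Nat))).1,
          (0 : Nat), (0 : Nat))).2.2 > 1 then false else true) =
    (let seq := pa ++ pb
     let ys := seq.map Prod.snd
     let k := (PySem.List.index? ys 7).getD ys.length
     let expected := ((0 :: ys).take (k + 1)) ++ List.replicate (seq.length - (k + 1)) 7
     let bad := (seq.zip expected).map (fun pe => pe.1.1 != pe.2)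
     decide ((bad.take pa.length).countP id ≤ 1) && decide ((bad.drop pa.length).countP id ≤ 1)) := by
  have hseq : (pa ++ pb).zip
      ((((0 : Int) :: (pa ++ pb).map Prod.snd).take
          (((PySem.List.index? ((pa ++ pb).map Prod.snd) 7).getD ((pa ++ pb).map Prod.snd).length) + 1)) ++
        List.replicate
          ((pa ++ pb).length - (((PySem.List.index? ((pa ++ pb).map Prod.snd) 7).getD ((pa ++ pb).map Prod.snd).length) + 1)) 7)
      = (pa ++ pb).zip (pvAnts (pa ++ pb) 0) := by
    rw [pvAnts_closed (pa ++ pb) 0 (by decide), pvZip_take]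
  simp only [hseq]
  -- split the A side: scan of pa ++ pb decomposes into the two folds
  have hsplit : ∀ (l₁ l₂ : List (Int × Int)) (ant : Int),
      pvAnts (l₁ ++ l₂) ant = pvAnts l₁ ant ++ pvAnts l₂ (pvLastAnt l₁ ant) := by
    intro l₁ l₂ ant
    induction l₁ generalizing ant with
    | nil => rfl
    | cons p r ih => simp [pvAnts, pvLastAnt, ih]
  rw [pvFoldA, pvFoldA]
  have hzipapp : (pa ++ pb).zip (pvAnts (pa ++ pb) 0)
      = pa.zip (pvAnts pa 0) ++ pb.zip (pvAnts pb (pvLastAnt pa 0)) := by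
    rw [hsplit]
    exact List.zip_append (by simp [pvAnts_length])
  rw [hzipapp, List.map_append]
  have hlen : (List.map (fun pe => pe.1.1 != pe.2) (pa.zip (pvAnts pa 0))).length = pa.length := by
    simp [List.length_zip, pvAnts_length]
  rw [← hlen, List.take_left, List.drop_left]
  simp only [Nat.zero_add]
  exact pvVerdict_eq _ _

-- ===== VERDICT =====
theorem lista_de_jogadas_spec : Claim_equal_lista_de_jogadas := by
  intro pedras _ _
  unfold Spec_lista_de_jogadas lista_de_jogadas lista_de_jogadas_alt
  rw [pvIndice_eq]
  exact pvCore _ _
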